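-- pv_equiv track=rewrite | github.com/SuBinMok/CordingTest | 프로그래머스/0/181872. 특정 문자열로 끝나는 가장 긴 부분 문자열 찾기/특정 문자열로 끝나는 가장 긴 부분 문자열 찾기.py | solution
-- ===== SOURCE A (Python) =====
-- def solution(myString, pat):
--     answer = ''
--     temp = 0
--     for i in range(len(myString)):
--         if myString[i:i+len(pat)] == pat:
--             temp = i + len(pat)
--     answer = myString[:temp]
--     return answer
-- ===== SOURCE B (Python) =====
-- def solution(myString, pat):
--     temp = 0
--     for i in range(len(myString) - 1, -1, -1):
--         if myString[i:i+len(pat)] == pat: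
--             temp = i + len(pat)
--             break
--     return myString[:temp]
-- ===== Notes on version B (the rewrite author's own statement) =====
-- stated objective: alternative
-- what changed: B scans backward from the end and stops at the first match (the last occurrence) instead of A's forward scan that overwrites temp on every match.
import Mathlib
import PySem

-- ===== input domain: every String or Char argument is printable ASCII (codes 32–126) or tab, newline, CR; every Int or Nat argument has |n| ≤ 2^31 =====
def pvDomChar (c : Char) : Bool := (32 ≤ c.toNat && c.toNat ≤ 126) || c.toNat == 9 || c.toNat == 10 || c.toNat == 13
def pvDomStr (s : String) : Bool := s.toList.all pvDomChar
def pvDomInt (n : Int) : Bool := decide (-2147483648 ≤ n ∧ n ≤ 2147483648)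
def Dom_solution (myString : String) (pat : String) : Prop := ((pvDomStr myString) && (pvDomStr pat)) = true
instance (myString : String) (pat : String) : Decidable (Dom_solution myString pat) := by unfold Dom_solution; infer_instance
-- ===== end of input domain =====

-- B replaces A's forward scan that overwrites temp at every match by a backward scan
-- with early exit at the first (= last) match; same cost, different traversal.

-- ===== PORT A =====
-- forward loop: for i in range(len(myString)): if myString[i:i+len(pat)] == pat: temp = i+len(pat)
def solution (myString : String) (pat : String) : String :=
  let s := myString.toList
  let p := pat.toList
  let temp : Int :=
    (PySem.List.pyRange 0 (PySem.Str.len myString) 1).foldl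
      (fun temp i =>
        if PySem.List.slice s (some i) (some (i + PySem.Str.len pat)) = p then
          i + PySem.Str.len pat
        else temp) 0
  String.ofList (PySem.List.slice s none (some temp))

-- ===== PORT B =====
-- backward loop with break: i = n-1, n-2, …, 0; stop at the first slice match
def solutionAltLoop (s p : List Char) : Nat → Int
  | 0 => 0
  | i + 1 =>
    if PySem.List.slice s (some (i : Int)) (some ((i : Int) + (p.length : Int))) = p then
      (i : Int) + (p.length : Int)
    else solutionAltLoop s p i

def solution_alt (myString : String) (pat : String) : String :=
  let s := myString.toList
  let p := pat.toList
  let temp : Int := solutionAltLoop s p s.length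
  String.ofList (PySem.List.slice s none (some temp))

-- ===== PRECONDITION & SPEC =====
def Spec_solution (myString : String) (pat : String) (out : String) : Prop := out = solution_alt myString pat
instance (myString : String) (pat : String) (out : String) : Decidable (Spec_solution myString pat out) := by unfold Spec_solution; infer_instance

-- ===== CLAIM (what is proved, stated in full; the proofs are below) =====
def Claim_equal_solution : Prop := ∀ (myString : String) (pat : String), Dom_solution myString pat → Spec_solution myString pat (solution myString pat)

-- ===== LEMMAS AND PROOFS =====
theorem solution_loop_eq (s p : List Char) (n : Nat) :
    (PySem.List.pyRange 0 (n : Int) 1).foldl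
      (fun temp i =>
        if PySem.List.slice s (some i) (some (i + (p.length : Int))) = p then
          i + (p.length : Int)
        else temp) 0 = solutionAltLoop s p n := by
  induction n with
  | zero => simp [PySem.List.pyRange_one_eq_nil, solutionAltLoop]
  | succ k ih =>
    push_cast
    rw [PySem.List.pyRange_one_append 0 (k : Int) ((k : Int) + 1) (by omega) (by omega)]
    simp only [List.foldl_append]
    rw [ih]
    rw [PySem.List.pyRange_one_cons (show (k : Int) < (k : Int) + 1 by omega),
        PySem.List.pyRange_one_eq_nil (show (k : Int) + 1 ≤ (k : Int) + 1 by omega)]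
    simp only [List.foldl_cons, List.foldl_nil, solutionAltLoop]

-- ===== VERDICT (by name: the statement is the Claim_ definition above) =====
theorem solution_spec : Claim_equal_solution := by
  intro myString pat _
  unfold Spec_solution solution solution_alt
  simp only [PySem.Str.len_eq]
  rw [solution_loop_eq]
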